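-- pv_equiv track=rewrite | github.com/pypi-data/pypi-mirror-403 | packages/agentpool/agentpool-2.8.8-py3-none-any.whl/agentpool_toolsets/fsspec_toolset/helpers.py | _reindent_text
-- ===== SOURCE A (Python) =====
-- def _reindent_text(text: str, delta: int, indent_char: str = " ") -> str:
--     """Reindent text by adding/removing leading whitespace.
--
--     Args:
--         text: Text to reindent
--         delta: Number of characters to add (positive) or remove (negative)
--         indent_char: Character to use for indentation (space or tab)
--
--     Returns:
--         Reindented text
--     """
--     if delta == 0:
--         return text
--
--     result_lines = []
--     for line in text.split("\n"):
--         if not line.strip():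
--             # Empty or whitespace-only line - keep as is
--             result_lines.append(line)
--             continue
--
--         current_indent = len(line) - len(line.lstrip())
--         if delta > 0:
--             # Add indentation
--             new_line = (indent_char * delta) + line
--         else:
--             # Remove indentation (but don't go negative)
--             chars_to_remove = min(abs(delta), current_indent)
--             new_line = line[chars_to_remove:]
--
--         result_lines.append(new_line)
--
--     return "\n".join(result_lines)
-- ===== SOURCE B (Python) =====
-- import re
--
-- _WS = r"[ \t\f\v\r]"  # line-internal whitespace: what str.strip() strips, minus "\n" (ASCII domain)
-- _NONBLANK = r"(?=" + _WS + r"*\S)"  # lookahead: this line contains a non-whitespace char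
--
--
-- def _reindent_text(text: str, delta: int, indent_char: str = " ") -> str:
--     """Reindent text with one regex substitution over the whole text."""
--     if delta == 0:
--         return text
--     if delta > 0:
--         # insert at the start of every non-blank line (function repl: no escape processing)
--         return re.sub(r"^" + _NONBLANK, lambda m: indent_char * delta, text, flags=re.MULTILINE)
--     # remove up to |delta| leading whitespace chars from every non-blank line
--     return re.sub(r"^" + _WS + "{0,%d}" % (-delta) + _NONBLANK, "", text, flags=re.MULTILINE)
-- ===== Notes on version B (the rewrite author's own statement) =====
-- stated objective: idiomatic
-- what changed: B replaces A's split('\n')/per-line transform/join loop by a single re.sub over the whole text (re.MULTILINE anchored at non-blank line starts, with a bounded leading-whitespace class match for delta<0).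
import Mathlib
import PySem

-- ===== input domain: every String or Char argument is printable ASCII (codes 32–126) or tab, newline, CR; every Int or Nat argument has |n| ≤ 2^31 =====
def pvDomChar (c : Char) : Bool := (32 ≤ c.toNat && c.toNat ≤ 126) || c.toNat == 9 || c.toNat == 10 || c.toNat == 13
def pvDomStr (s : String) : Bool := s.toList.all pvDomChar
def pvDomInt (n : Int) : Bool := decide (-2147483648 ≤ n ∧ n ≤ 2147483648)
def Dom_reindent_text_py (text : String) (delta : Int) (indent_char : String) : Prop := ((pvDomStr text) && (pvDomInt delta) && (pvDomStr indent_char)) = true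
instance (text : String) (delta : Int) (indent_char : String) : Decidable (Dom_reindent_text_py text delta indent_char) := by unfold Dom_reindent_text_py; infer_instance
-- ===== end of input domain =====

-- B replaces A's split/transform/join over lines by a single regex substitution at non-blank
-- line starts (ported as one left-to-right scan over the characters); objective: idiomatic.

-- ===== PORT A =====
def reindent_text_py (text : String) (delta : Int) (indent_char : String) : String :=
  if delta == 0 then text
  else
    let result_lines := (PySem.Chars.splitOn text.toList ['\n']).foldl
      (fun acc line =>
        if (PySem.Chars.strip line).isEmpty then acc ++ [line]
        else
          let current_indent : Int := (line.length : Int) - ((PySem.Chars.lstrip line).length : Int)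
          let new_line := if delta > 0 then PySem.List.pyRepeat indent_char.toList delta ++ line
            else PySem.Chars.slice line (some (min (delta.natAbs : Int) current_indent)) none
          acc ++ [new_line]) []
    String.mk (PySem.Chars.join ['\n'] result_lines)

-- ===== PORT B =====
-- the regex character class "[ \t\f\v\r]" (str.strip's whitespace minus "\n"); exact on the
-- printable-ASCII + tab/CR domain
def pvWsB (c : Char) : Bool := PySem.Chars.isspace c && c != '\n'

-- the lookahead "(?=[ \t\f\v\r]*\S)": this line contains a non-whitespace character
def pvLookNB : List Char → Bool
  | [] => false
  | c :: rest => if pvWsB c then pvLookNB rest else c != '\n'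

-- split off the current line (including its "\n", if any) from the rest of the text
def pvSplitLine : List Char → List Char × List Char
  | [] => ([], [])
  | c :: rest =>
    if c == '\n' then ([c], rest)
    else
      let p := pvSplitLine rest
      (c :: p.1, p.2)

lemma pvSplitLine_snd_le : ∀ cs : List Char, (pvSplitLine cs).2.length ≤ cs.length := by
  intro cs
  induction cs with
  | nil => simp [pvSplitLine]
  | cons c rest ih =>
    by_cases h : c == '\n' <;> simp [pvSplitLine, h] <;> omega

lemma pvSplitLine_snd_lt (c : Char) (rest : List Char) :
    (pvSplitLine (c :: rest)).2.length < (c :: rest).length := by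
  by_cases h : c == '\n' <;> simp [pvSplitLine, h]
  · exact pvSplitLine_snd_le rest

-- the regex "{0,k}" bounded removal of class characters
def pvDropWs : Nat → List Char → List Char
  | 0, cs => cs
  | _ + 1, [] => []
  | k + 1, c :: rest => if pvWsB c then pvDropWs k rest else c :: rest

-- delta > 0: re.sub inserting ind at every non-blank line start, as a scan over line starts
def pvGoPos (ind : List Char) : List Char → List Char
  | [] => []
  | c :: rest =>
    let p := pvSplitLine (c :: rest)
    (if pvLookNB (c :: rest) then ind else []) ++ p.1 ++ pvGoPos ind p.2
termination_by cs => cs.length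
decreasing_by exact pvSplitLine_snd_lt c rest

-- delta < 0: re.sub removing up to k class chars at every non-blank line start
def pvGoNeg (k : Nat) : List Char → List Char
  | [] => []
  | c :: rest =>
    let p := pvSplitLine (c :: rest)
    (if pvLookNB (c :: rest) then pvDropWs k p.1 else p.1) ++ pvGoNeg k p.2
termination_by cs => cs.length
decreasing_by exact pvSplitLine_snd_lt c rest

def reindent_text_py_alt (text : String) (delta : Int) (indent_char : String) : String :=
  if delta == 0 then text
  else if delta > 0 then
    String.mk (pvGoPos (PySem.List.pyRepeat indent_char.toList delta) text.toList)
  else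
    String.mk (pvGoNeg delta.natAbs text.toList)

-- ===== PRECONDITION & SPEC =====
def Spec_reindent_text_py (text : String) (delta : Int) (indent_char : String) (out : String) : Prop := out = reindent_text_py_alt text delta indent_char
instance (text : String) (delta : Int) (indent_char : String) (out : String) : Decidable (Spec_reindent_text_py text delta indent_char out) := by unfold Spec_reindent_text_py; infer_instance

-- ===== CLAIM (what is proved, stated in full; the proofs are below) =====
def Claim_equal_reindent_text_py : Prop := ∀ (text : String) (delta : Int) (indent_char : String), Dom_reindent_text_py text delta indent_char → Spec_reindent_text_py text delta indent_char (reindent_text_py text delta indent_char)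

-- ===== LEMMAS AND PROOFS =====

-- proof-side model of text.split("\n")
def pvSplitNl : List Char → List (List Char)
  | [] => [[]]
  | c :: rest =>
    if c = '\n' then [] :: pvSplitNl rest
    else
      match pvSplitNl rest with
      | [] => [[c]]
      | p :: ps => (c :: p) :: ps

lemma pvSplitNl_ne_nil : ∀ cs : List Char, pvSplitNl cs ≠ [] := by
  intro cs
  cases cs with
  | nil => simp [pvSplitNl]
  | cons c rest =>
    by_cases h : c = '\n' <;> simp only [pvSplitNl, h, if_true, if_false] <;> try simp
    cases pvSplitNl rest <;> simp

lemma pvGo_eq : ∀ (fuel : Nat) (l cur : List Char) (acc : List (List Char)) (p : List Char)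
    (ps : List (List Char)), pvSplitNl l = p :: ps → l.length < fuel →
    PySem.Chars.splitOn.go ['\n'] fuel l cur acc = acc.reverse ++ (cur.reverse ++ p) :: ps := by
  intro fuel
  induction fuel with
  | zero => intro l cur acc p ps _ hl; omega
  | succ fuel ih =>
    intro l cur acc p ps hs hl
    cases l with
    | nil =>
      simp only [pvSplitNl, List.cons.injEq] at hs
      rw [PySem.Chars.splitOn.go]
      simp [← hs.1, ← hs.2]
      omega
    | cons c rest =>
      obtain ⟨q, qs, hq⟩ : ∃ q qs, pvSplitNl rest = q :: qs := by
        cases hqq : pvSplitNl rest with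
        | nil => exact absurd hqq (pvSplitNl_ne_nil rest)
        | cons q qs => exact ⟨q, qs, rfl⟩
      by_cases hc : c = '\n'
      · simp only [pvSplitNl, hc, if_pos, hq, List.cons.injEq] at hs
        rw [PySem.Chars.splitOn.go]
        have hpre : List.isPrefixOf ['\n'] (c :: rest) = true := by
          simp [List.isPrefixOf, hc]
        rw [if_pos hpre]
        have hdrop : List.drop (List.length ['\n']) (c :: rest) = rest := by simp
        rw [hdrop]
        rw [ih rest [] (cur.reverse :: acc) q qs hq (by simp at hl; omega)]
        simp [← hs.1, ← hs.2]
      · simp only [pvSplitNl, hc, if_false, hq, List.cons.injEq] at hs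
        rw [PySem.Chars.splitOn.go]
        have hpre : List.isPrefixOf ['\n'] (c :: rest) = false := by
          simp [List.isPrefixOf]; exact fun h => absurd h.symm hc
        rw [if_neg (by simp [hpre])]
        rw [ih rest (c :: cur) acc q qs hq (by simp at hl; omega)]
        simp [← hs.1, ← hs.2]

lemma pvSplitOn_eq (cs : List Char) : PySem.Chars.splitOn cs ['\n'] = pvSplitNl cs := by
  obtain ⟨p, ps, hp⟩ : ∃ p ps, pvSplitNl cs = p :: ps := by
    cases hqq : pvSplitNl cs with
    | nil => exact absurd hqq (pvSplitNl_ne_nil cs)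
    | cons p ps => exact ⟨p, ps, rfl⟩
  unfold PySem.Chars.splitOn
  rw [pvGo_eq (cs.length + 1) cs [] [] p ps hp (by omega)]
  simp [hp]

-- A's per-line transformation
def pvFA (delta : Int) (ind : List Char) (line : List Char) : List Char :=
  if (PySem.Chars.strip line).isEmpty then line
  else if delta > 0 then ind ++ line
  else PySem.Chars.slice line
    (some (min (delta.natAbs : Int) ((line.length : Int) - ((PySem.Chars.lstrip line).length : Int)))) none

lemma pvFoldl_A (delta : Int) (ind : List Char) : ∀ (l acc : List (List Char)),
    l.foldl (fun acc line =>
      if (PySem.Chars.strip line).isEmpty then acc ++ [line]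
      else
        let current_indent : Int := (line.length : Int) - ((PySem.Chars.lstrip line).length : Int)
        let new_line := if delta > 0 then ind ++ line
          else PySem.Chars.slice line (some (min (delta.natAbs : Int) current_indent)) none
        acc ++ [new_line]) acc = acc ++ l.map (pvFA delta ind) := by
  intro l
  induction l with
  | nil => intro acc; simp
  | cons x t ih =>
    intro acc
    rw [List.foldl_cons, ih, List.map_cons]
    have : (if (PySem.Chars.strip x).isEmpty then acc ++ [x]
      else
        let current_indent : Int := (x.length : Int) - ((PySem.Chars.lstrip x).length : Int)
        let new_line := if delta > 0 then ind ++ x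
          else PySem.Chars.slice x (some (min (delta.natAbs : Int) current_indent)) none
        acc ++ [new_line]) = acc ++ [pvFA delta ind x] := by
      unfold pvFA
      split_ifs <;> simp
    rw [this]
    simp

lemma pvA_unfold (text : String) (delta : Int) (ic : String) (h : ¬ delta = 0) :
    reindent_text_py text delta ic =
      String.mk (PySem.Chars.join ['\n']
        ((pvSplitNl text.toList).map (pvFA delta (PySem.List.pyRepeat ic.toList delta)))) := by
  unfold reindent_text_py
  rw [if_neg (by simpa using h)]
  rw [pvFoldl_A delta (PySem.List.pyRepeat ic.toList delta) (PySem.Chars.splitOn text.toList ['\n']) []]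
  rw [pvSplitOn_eq]
  simp

lemma pvStrip_nil_iff (line : List Char) :
    PySem.Chars.strip line = [] ↔ ∀ c ∈ line, PySem.Chars.isspace c := by
  simp only [PySem.Chars.strip, PySem.Chars.rstrip, PySem.Chars.lstrip,
    List.reverse_eq_nil_iff, List.dropWhile_eq_nil_iff, List.mem_reverse]
  constructor
  · intro hd c hc
    rcases List.mem_append.mp
        ((List.takeWhile_append_dropWhile (p := PySem.Chars.isspace) (l := line)) ▸ hc) with
      hm | hm
    · exact List.mem_takeWhile_imp hm
    · exact hd c hm
  · intro hall c hc
    exact hall c ((List.dropWhile_sublist _).subset hc)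

lemma pvBlank_iff (line : List Char) :
    (PySem.Chars.strip line).isEmpty = line.all PySem.Chars.isspace := by
  rw [Bool.eq_iff_iff]
  simp [List.isEmpty_iff, pvStrip_nil_iff, List.all_eq_true]

lemma pvAll_congr (line : List Char) (h : '\n' ∉ line) :
    line.all PySem.Chars.isspace = line.all pvWsB := by
  induction line with
  | nil => rfl
  | cons c t ih =>
    simp only [List.mem_cons, not_or] at h
    simp only [List.all_cons, ih h.2, pvWsB]
    cases hs : PySem.Chars.isspace c <;> simp [Ne.symm h.1]

lemma pvTakeWhile_congr (line : List Char) (h : '\n' ∉ line) :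
    line.takeWhile PySem.Chars.isspace = line.takeWhile pvWsB := by
  induction line with
  | nil => rfl
  | cons c t ih =>
    simp only [List.mem_cons, not_or] at h
    have hc : pvWsB c = PySem.Chars.isspace c := by
      simp [pvWsB, Ne.symm h.1]
    cases hs : PySem.Chars.isspace c <;>
      simp [List.takeWhile_cons, hs, hc, ih h.2]

lemma pvLookNB_append (line rest : List Char) (h : '\n' ∉ line) :
    pvLookNB (line ++ '\n' :: rest) = !line.all pvWsB := by
  induction line with
  | nil => simp [pvLookNB, pvWsB]
  | cons c t ih =>
    simp only [List.mem_cons, not_or] at h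
    by_cases hw : pvWsB c
    · simp [pvLookNB, hw, ih h.2]
    · simp [pvLookNB, hw, Ne.symm h.1]

lemma pvLookNB_last (line : List Char) (h : '\n' ∉ line) :
    pvLookNB line = !line.all pvWsB := by
  induction line with
  | nil => simp [pvLookNB]
  | cons c t ih =>
    simp only [List.mem_cons, not_or] at h
    by_cases hw : pvWsB c
    · simp [pvLookNB, hw, ih h.2]
    · simp [pvLookNB, hw, Ne.symm h.1]

lemma pvDropWs_eq : ∀ (k : Nat) (line : List Char),
    pvDropWs k line = line.drop (min k (line.takeWhile pvWsB).length) := by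
  intro k
  induction k with
  | zero => intro line; simp [pvDropWs]
  | succ k ih =>
    intro line
    cases line with
    | nil => simp [pvDropWs]
    | cons c rest =>
      by_cases hw : pvWsB c
      · have hm : min (k + 1) (((c :: rest).takeWhile pvWsB).length)
            = min k ((rest.takeWhile pvWsB).length) + 1 := by
          simp [hw]
        rw [pvDropWs, if_pos hw, ih rest, hm, List.drop_succ_cons]
      · simp [pvDropWs, hw]

lemma pvSlice_from_nat (l : List Char) (k : Nat) :
    PySem.List.slice l (some (k : Int)) none = l.drop k := by
  simp only [PySem.List.slice]
  by_cases h : k ≤ l.length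
  · simp [Nat.min_eq_left h]
  · have h' : l.length ≤ k := by omega
    simp [Nat.min_eq_right h', List.drop_eq_nil_of_le h']

lemma pvFA_neg (delta : Int) (ind line : List Char) (hδ : delta < 0) (h : '\n' ∉ line)
    (hnb : ¬ line.all pvWsB = true) :
    pvFA delta ind line = pvDropWs delta.natAbs line := by
  unfold pvFA
  rw [if_neg (by simp only [pvBlank_iff, pvAll_congr line h]; simp [hnb]),
    if_neg (by omega)]
  have hlen : (line.takeWhile PySem.Chars.isspace).length
      + (PySem.Chars.lstrip line).length = line.length := by
    rw [PySem.Chars.lstrip, ← List.length_append, List.takeWhile_append_dropWhile]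
  have hmin : min ((delta.natAbs : Int))
      ((line.length : Int) - ((PySem.Chars.lstrip line).length : Int))
      = ((min delta.natAbs (line.takeWhile PySem.Chars.isspace).length : Nat) : Int) := by
    push_cast
    omega
  rw [hmin]
  simp only [PySem.Chars.slice_eq_listSlice]
  rw [pvSlice_from_nat, pvDropWs_eq, pvTakeWhile_congr line h]

lemma pvSplitLine_nil_of_no_nl (cs : List Char) (h : '\n' ∉ cs) : pvSplitLine cs = (cs, []) := by
  induction cs with
  | nil => rfl
  | cons c rest ih =>
    simp only [List.mem_cons, not_or] at h
    simp [pvSplitLine, Ne.symm h.1, ih h.2]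

lemma pvSplitLine_append (line rest : List Char) (h : '\n' ∉ line) :
    pvSplitLine (line ++ '\n' :: rest) = (line ++ ['\n'], rest) := by
  induction line with
  | nil => simp [pvSplitLine]
  | cons c t ih =>
    simp only [List.mem_cons, not_or] at h
    simp [pvSplitLine, Ne.symm h.1, ih h.2]

lemma pvSplitNl_no_nl (line : List Char) (h : '\n' ∉ line) : pvSplitNl line = [line] := by
  induction line with
  | nil => rfl
  | cons c t ih =>
    simp only [List.mem_cons, not_or] at h
    simp [pvSplitNl, Ne.symm h.1, ih h.2]

lemma pvSplitNl_append (line rest : List Char) (h : '\n' ∉ line) :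
    pvSplitNl (line ++ '\n' :: rest) = line :: pvSplitNl rest := by
  induction line with
  | nil => simp [pvSplitNl]
  | cons c t ih =>
    simp only [List.mem_cons, not_or] at h
    simp only [List.cons_append, pvSplitNl, ih h.2]
    simp [Ne.symm h.1]

lemma pvDecomp (cs : List Char) :
    '\n' ∉ cs ∨ ∃ line rest, cs = line ++ '\n' :: rest ∧ '\n' ∉ line := by
  induction cs with
  | nil => left; simp
  | cons c rest ih =>
    by_cases hc : c = '\n'
    · right; exact ⟨[], rest, by simp [hc], by simp⟩
    · rcases ih with h | ⟨line, rest', heq, hn⟩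
      · left; simp [h, Ne.symm hc]
      · right; exact ⟨c :: line, rest', by simp [heq], by simp [hn, Ne.symm hc]⟩

lemma pvGoPos_ne_nil (ind : List Char) (cs : List Char) (h : cs ≠ []) :
    pvGoPos ind cs = (if pvLookNB cs then ind else []) ++ (pvSplitLine cs).1
      ++ pvGoPos ind (pvSplitLine cs).2 := by
  cases cs with
  | nil => exact absurd rfl h
  | cons c rest => rw [pvGoPos.eq_def]

lemma pvGoNeg_ne_nil (k : Nat) (cs : List Char) (h : cs ≠ []) :
    pvGoNeg k cs = (if pvLookNB cs then pvDropWs k (pvSplitLine cs).1 else (pvSplitLine cs).1)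
      ++ pvGoNeg k (pvSplitLine cs).2 := by
  cases cs with
  | nil => exact absurd rfl h
  | cons c rest => rw [pvGoNeg.eq_def]

lemma pvFA_nil (delta : Int) (ind : List Char) : pvFA delta ind [] = [] := rfl

lemma pvGoPos_nil (ind : List Char) : pvGoPos ind [] = [] := by rw [pvGoPos.eq_def]

lemma pvGoNeg_nil (k : Nat) : pvGoNeg k [] = [] := by rw [pvGoNeg.eq_def]

lemma pvTakeWhile_append_left (p : Char → Bool) (line ys : List Char)
    (h : ¬ line.all p = true) : (line ++ ys).takeWhile p = line.takeWhile p := by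
  induction line with
  | nil => simp at h
  | cons c t ih =>
    by_cases hc : p c
    · simp only [List.all_cons, hc, Bool.true_and] at h
      simp [List.takeWhile_cons, hc, ih h]
    · simp [List.takeWhile_cons, hc]

lemma pvGoPos_join (ind : List Char) (delta : Int) (hδ : 0 < delta) :
    ∀ (n : Nat) (cs : List Char), cs.length ≤ n →
      pvGoPos ind cs = PySem.Chars.join ['\n'] ((pvSplitNl cs).map (pvFA delta ind)) := by
  intro n
  induction n with
  | zero =>
    intro cs hlen
    have : cs = [] := by simpa using hlen
    subst this
    simp [pvGoPos_nil, pvSplitNl, pvFA_nil, PySem.Chars.join_singleton]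
  | succ n ih =>
    intro cs hlen
    rcases eq_or_ne cs [] with rfl | hne
    · simp [pvGoPos_nil, pvSplitNl, pvFA_nil, PySem.Chars.join_singleton]
    rcases pvDecomp cs with hno | ⟨line, rest, rfl, hnl⟩
    · rw [pvGoPos_ne_nil ind cs hne, pvSplitLine_nil_of_no_nl cs hno,
        pvSplitNl_no_nl cs hno, pvLookNB_last cs hno]
      by_cases hb : cs.all pvWsB = true
      · simp [hb, pvGoPos_nil, PySem.Chars.join_singleton, pvFA,
          pvBlank_iff, pvAll_congr cs hno]
      · simp only [hb, Bool.not_false, if_pos, List.map_cons, List.map_nil,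
          PySem.Chars.join_singleton, pvGoPos_nil, List.append_nil]
        rw [pvFA]
        rw [if_neg (by simp only [pvBlank_iff, pvAll_congr cs hno]; simp [hb]),
          if_pos (by omega)]
    · have hne' : line ++ '\n' :: rest ≠ [] := by simp
      rw [pvGoPos_ne_nil ind _ hne', pvSplitLine_append line rest hnl,
        pvSplitNl_append line rest hnl, pvLookNB_append line rest hnl]
      have hr : rest.length ≤ n := by simp at hlen; omega
      cases hq : pvSplitNl rest with
      | nil => exact absurd hq (pvSplitNl_ne_nil rest)
      | cons q qs =>
        rw [List.map_cons, List.map_cons, PySem.Chars.join_cons_cons]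
        have ihr := ih rest hr
        rw [hq, List.map_cons] at ihr
        by_cases hb : line.all pvWsB = true
        · have hfa : pvFA delta ind line = line := by
            rw [pvFA, if_pos (by rw [pvBlank_iff, pvAll_congr line hnl]; exact hb)]
          simp [hb, ihr, hfa]
        · have hfa : pvFA delta ind line = ind ++ line := by
            rw [pvFA, if_neg (by simp only [pvBlank_iff, pvAll_congr line hnl]; simp [hb]),
              if_pos (by omega)]
          simp [hb, ihr, hfa]

lemma pvGoNeg_join (ind : List Char) (delta : Int) (hδ : delta < 0) :
    ∀ (n : Nat) (cs : List Char), cs.length ≤ n →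
      pvGoNeg delta.natAbs cs = PySem.Chars.join ['\n'] ((pvSplitNl cs).map (pvFA delta ind)) := by
  intro n
  induction n with
  | zero =>
    intro cs hlen
    have : cs = [] := by simpa using hlen
    subst this
    simp [pvGoNeg_nil, pvSplitNl, pvFA_nil, PySem.Chars.join_singleton]
  | succ n ih =>
    intro cs hlen
    rcases eq_or_ne cs [] with rfl | hne
    · simp [pvGoNeg_nil, pvSplitNl, pvFA_nil, PySem.Chars.join_singleton]
    rcases pvDecomp cs with hno | ⟨line, rest, rfl, hnl⟩
    · rw [pvGoNeg_ne_nil _ cs hne, pvSplitLine_nil_of_no_nl cs hno,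
        pvSplitNl_no_nl cs hno, pvLookNB_last cs hno]
      by_cases hb : cs.all pvWsB = true
      · simp [hb, pvGoNeg_nil, PySem.Chars.join_singleton, pvFA,
          pvBlank_iff, pvAll_congr cs hno]
      · simp only [hb, Bool.not_false, if_pos, List.map_cons, List.map_nil,
          PySem.Chars.join_singleton, pvGoNeg_nil, List.append_nil]
        rw [pvFA_neg delta ind cs hδ hno hb]
    · have hne' : line ++ '\n' :: rest ≠ [] := by simp
      rw [pvGoNeg_ne_nil _ _ hne', pvSplitLine_append line rest hnl,
        pvSplitNl_append line rest hnl, pvLookNB_append line rest hnl]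
      have hr : rest.length ≤ n := by simp at hlen; omega
      cases hq : pvSplitNl rest with
      | nil => exact absurd hq (pvSplitNl_ne_nil rest)
      | cons q qs =>
        rw [List.map_cons, List.map_cons, PySem.Chars.join_cons_cons]
        have ihr := ih rest hr
        rw [hq, List.map_cons] at ihr
        by_cases hb : line.all pvWsB = true
        · have hfa : pvFA delta ind line = line := by
            rw [pvFA, if_pos (by rw [pvBlank_iff, pvAll_congr line hnl]; exact hb)]
          simp [hb, ihr, hfa]
        · have hdrop : pvDropWs delta.natAbs (line ++ ['\n'])
              = pvDropWs delta.natAbs line ++ ['\n'] := by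
            rw [pvDropWs_eq, pvDropWs_eq, pvTakeWhile_append_left pvWsB line ['\n'] hb,
              List.drop_append_of_le_length
                (le_trans (Nat.min_le_right _ _) (List.takeWhile_sublist _).length_le)]
          rw [pvFA_neg delta ind line hδ hnl hb]
          simp [hb, ihr, hdrop]

-- ===== VERDICT (by name: the statement is the Claim_ definition above) =====
theorem reindent_text_py_spec : Claim_equal_reindent_text_py := by
  intro text delta ic _
  unfold Spec_reindent_text_py
  by_cases h0 : delta = 0
  · simp [reindent_text_py, reindent_text_py_alt, h0]
  · rw [pvA_unfold text delta ic h0]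
    unfold reindent_text_py_alt
    rcases lt_or_gt_of_ne h0 with hneg | hpos
    · rw [if_neg (by simpa using h0), if_neg (by omega)]
      rw [pvGoNeg_join (PySem.List.pyRepeat ic.toList delta) delta hneg text.toList.length
            text.toList (le_refl _)]
    · rw [if_neg (by simpa using h0), if_pos (by omega)]
      rw [pvGoPos_join (PySem.List.pyRepeat ic.toList delta) delta hpos text.toList.length
            text.toList (le_refl _)]
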